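-- pv_equiv track=rewrite | github.com/lance0145/atd | asoc.py | default_un
-- ===== SOURCE A (Python) =====
-- def default_all(minion):
-- 	if ',' in minion:
-- 		minion = f"-L '{minion}'"
-- 	if minion.lower() == 'all' or minion.lower() == 'a':
-- 		minion = "'*'"
-- 	return minion
--
-- def default_un(value):
-- 	minion = "'*'"
-- 	sid = ""
--
-- 	for v in value:
-- 		if v.isdigit():
-- 			sid = v
-- 		else:
-- 			minion = default_all(v)
--
-- 	return minion, sid
-- ===== SOURCE B (Python) =====
-- def default_all(minion):
-- 	if ',' in minion:
-- 		minion = f"-L '{minion}'"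
-- 	if minion.lower() == 'all' or minion.lower() == 'a':
-- 		minion = "'*'"
-- 	return minion
--
-- def default_un(value):
-- 	sid = next((v for v in reversed(value) if v.isdigit()), "")
-- 	m = next((v for v in reversed(value) if not v.isdigit()), None)
-- 	minion = "'*'" if m is None else default_all(m)
-- 	return minion, sid
-- ===== Notes on version B (the rewrite author's own statement) =====
-- stated objective: faster
-- what changed: Replaces A's single forward fold that reapplies default_all to every non-digit element with two early-exit reverse searches (last digit string, last non-digit string) and a single default_all call.
import Mathlib
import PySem

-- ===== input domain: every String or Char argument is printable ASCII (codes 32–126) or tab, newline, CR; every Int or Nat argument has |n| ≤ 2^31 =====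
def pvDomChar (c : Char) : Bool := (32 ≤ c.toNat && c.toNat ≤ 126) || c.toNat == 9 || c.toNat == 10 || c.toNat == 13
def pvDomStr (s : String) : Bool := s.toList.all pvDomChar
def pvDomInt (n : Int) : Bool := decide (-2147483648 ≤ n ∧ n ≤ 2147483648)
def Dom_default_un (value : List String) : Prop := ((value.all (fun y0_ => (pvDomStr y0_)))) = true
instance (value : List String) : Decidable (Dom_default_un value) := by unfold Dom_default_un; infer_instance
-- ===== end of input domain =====

-- B replaces A's forward fold (which reapplies default_all to every non-digit element)
-- by two early-exit reverse searches and a single default_all call; same return value.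

-- ===== PORT A =====
-- shared module helper default_all, used verbatim by both ports
def default_all (minion : String) : String :=
  let m1 := if PySem.Str.isIn "," minion then "-L '" ++ minion ++ "'" else minion
  if PySem.Str.lower m1 == "all" || PySem.Str.lower m1 == "a" then "'*'" else m1

def default_un (value : List String) : String × String :=
  value.foldl
    (fun (st : String × String) v =>
      if PySem.Str.strIsdigit v then (st.1, v) else (default_all v, st.2))
    ("'*'", "")

-- ===== PORT B =====
def default_un_alt (value : List String) : String × String :=
  let sid := (value.reverse.find? (fun v => PySem.Str.strIsdigit v)).getD ""
  let minion :=
    match value.reverse.find? (fun v => !PySem.Str.strIsdigit v) with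
    | none => "'*'"
    | some m => default_all m
  (minion, sid)

-- ===== PRECONDITION & SPEC =====
def Spec_default_un (value : List String) (out : String × String) : Prop := out = default_un_alt value
instance (value : List String) (out : String × String) : Decidable (Spec_default_un value out) := by unfold Spec_default_un; infer_instance

-- ===== CLAIM (what is proved, stated in full; the proofs are below) =====
def Claim_equal_default_un : Prop := ∀ (value : List String), Dom_default_un value → Spec_default_un value (default_un value)

-- ===== LEMMAS AND PROOFS =====
theorem default_un_fold_eq (xs : List String) (a b : String) :
    xs.foldl
      (fun (st : String × String) v =>
        if PySem.Str.strIsdigit v then (st.1, v) else (default_all v, st.2)) (a, b)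
    = ((match xs.reverse.find? (fun v => !PySem.Str.strIsdigit v) with
        | none => a
        | some m => default_all m),
       (xs.reverse.find? (fun v => PySem.Str.strIsdigit v)).getD b) := by
  induction xs generalizing a b with
  | nil => simp
  | cons v t ih =>
    simp only [List.foldl_cons, List.reverse_cons, List.find?_append]
    by_cases h : PySem.Str.strIsdigit v = true
    · rw [if_pos h, ih]
      have h' : PySem.Chars.strIsdigit v.toList = true := by
        simpa [PySem.Str.strIsdigit] using h
      cases ht : t.reverse.find? (fun v => !PySem.Str.strIsdigit v) <;>
        cases hd : t.reverse.find? (fun v => PySem.Str.strIsdigit v) <;>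
        simp [List.find?, h']
    · rw [if_neg h, ih]
      simp only [Bool.not_eq_true] at h
      have h' : PySem.Chars.strIsdigit v.toList = false := by
        simpa [PySem.Str.strIsdigit] using h
      cases ht : t.reverse.find? (fun v => !PySem.Str.strIsdigit v) <;>
        cases hd : t.reverse.find? (fun v => PySem.Str.strIsdigit v) <;>
        simp [List.find?, h']

-- ===== VERDICT (by name: the statement is the Claim_ definition above) =====
theorem default_un_spec : Claim_equal_default_un := by
  intro value _
  unfold Spec_default_un default_un default_un_alt
  exact default_un_fold_eq value _ _
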